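-- pv_equiv track=rewrite | github.com/bytedance/g3 | scripts/cpuset_split.py | cpu_set_to_list
-- ===== SOURCE A (Python) =====
-- def cpu_set_to_list(s: str):
--     # Convert CPU SET mask to CPU ID list
--     cpus = []
--     i = 0
--     for c in reversed(s):
--         n = int(c, 16)
--
--         if n & 0b0001:
--             cpus.append(str(i))
--         i += 1
--         if n & 0b0010:
--             cpus.append(str(i))
--         i += 1
--         if n & 0b0100:
--             cpus.append(str(i))
--         i += 1
--         if n & 0b1000:
--             cpus.append(str(i))
--         i += 1
--     return cpus
-- ===== SOURCE B (Python) =====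
-- def cpu_set_to_list(s: str):
--     # Convert CPU SET mask to CPU ID list.
--     # Build the whole mask as one integer first, then decode its set bits in
--     # increasing order (same output and same per-char ValueError as A).
--     mask = 0
--     shift = 0
--     for c in reversed(s):
--         mask += int(c, 16) << shift
--         shift += 4
--     cpus = []
--     for i in range(mask.bit_length()):
--         if (mask >> i) & 1:
--             cpus.append(str(i))
--     return cpus
-- ===== Notes on version B (the rewrite author's own statement) =====
-- stated objective: alternative
-- what changed: B first folds the whole string into a single integer mask (mask += int(c,16) << shift) and then emits the CPU ids in one ascending scan over the mask's bits, instead of A's four interleaved bit-tests and counter increments per hex character.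
-- outside the precondition, e.g. on cpu_set_to_list('0x1'): A raises ValueError, B raises ValueError
import Mathlib
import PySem

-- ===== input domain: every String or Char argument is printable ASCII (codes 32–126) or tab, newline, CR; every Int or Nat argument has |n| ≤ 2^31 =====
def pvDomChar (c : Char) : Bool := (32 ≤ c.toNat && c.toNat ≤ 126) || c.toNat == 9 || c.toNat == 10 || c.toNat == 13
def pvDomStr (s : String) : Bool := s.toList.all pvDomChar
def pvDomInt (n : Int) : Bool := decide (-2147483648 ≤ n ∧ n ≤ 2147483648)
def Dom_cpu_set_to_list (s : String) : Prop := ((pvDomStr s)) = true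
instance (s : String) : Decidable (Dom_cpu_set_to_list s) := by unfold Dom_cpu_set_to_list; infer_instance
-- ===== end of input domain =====

-- B decodes a hex CPU mask by first summing the whole mask into one integer and then
-- scanning its bits once, instead of A's four bit-tests interleaved per character;
-- objective: alternative decomposition (same output, same cost class).

-- ===== PORT A =====
-- int(c, 16) for a single character; exact on hex digits. On non-hex characters
-- Python raises ValueError (excluded by Pre_); there hexVal returns 0.
def hexVal (c : Char) : Nat :=
  let n := c.toNat
  if 48 ≤ n ∧ n ≤ 57 then n - 48
  else if 97 ≤ n ∧ n ≤ 102 then n - 87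
  else if 65 ≤ n ∧ n ≤ 70 then n - 55
  else 0

-- A's for-loop over reversed(s), carrying (cpus, i); 'if n & 0bxxxx:' is 'n &&& k ≠ 0'
def cpuLoopA : List Char → List String → Int → List String
  | [], cpus, _ => cpus
  | c :: rest, cpus, i =>
    let n := hexVal c
    let cpus1 := if n &&& 1 ≠ 0 then cpus ++ [PySem.Int.toStr i] else cpus
    let cpus2 := if n &&& 2 ≠ 0 then cpus1 ++ [PySem.Int.toStr (i + 1)] else cpus1
    let cpus3 := if n &&& 4 ≠ 0 then cpus2 ++ [PySem.Int.toStr (i + 2)] else cpus2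
    let cpus4 := if n &&& 8 ≠ 0 then cpus3 ++ [PySem.Int.toStr (i + 3)] else cpus3
    cpuLoopA rest cpus4 (i + 4)

def cpu_set_to_list (s : String) : List String :=
  cpuLoopA s.toList.reverse [] 0

-- ===== PORT B =====
-- B's first loop: mask += int(c,16) << shift; shift += 4.  mask and shift are
-- nonnegative Python ints throughout, ported as Nat.
def maskLoopB : List Char → Nat → Nat → Nat
  | [], mask, _ => mask
  | c :: rest, mask, shift => maskLoopB rest (mask + (hexVal c <<< shift)) (shift + 4)

-- B's second loop: range(mask.bit_length()) is List.range (Nat.size mask) (exact: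
-- mask ≥ 0 and Nat.size is the bit length); '(mask >> i) & 1' truthiness is '== 1'.
def cpu_set_to_list_alt (s : String) : List String :=
  let mask := maskLoopB s.toList.reverse 0 0
  (List.range (Nat.size mask)).foldl
    (fun cpus i => if (mask >>> i) &&& 1 == 1 then cpus ++ [PySem.Int.toStr (i : Int)] else cpus) []

-- ===== PRECONDITION & SPEC =====
-- Pre_ excludes exactly the strings containing a non-hex-digit character, on which
-- A's int(c, 16) raises ValueError (B raises the same way there).
def isHexDigitChar (c : Char) : Bool :=
  (48 ≤ c.toNat && c.toNat ≤ 57) || (97 ≤ c.toNat && c.toNat ≤ 102) || (65 ≤ c.toNat && c.toNat ≤ 70)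

def Pre_cpu_set_to_list (s : String) : Prop := s.toList.all isHexDigitChar = true
instance (s : String) : Decidable (Pre_cpu_set_to_list s) := by unfold Pre_cpu_set_to_list; infer_instance

def pvWitness_cpu_set_to_list : String := "a03F"

def Spec_cpu_set_to_list (s : String) (out : List String) : Prop := out = cpu_set_to_list_alt s
instance (s : String) (out : List String) : Decidable (Spec_cpu_set_to_list s out) := by unfold Spec_cpu_set_to_list; infer_instance

-- ===== CLAIM (what is proved, stated in full; the proofs are below) =====
def Claim_equal_cpu_set_to_list : Prop := ∀ (s : String), Dom_cpu_set_to_list s → Pre_cpu_set_to_list s → Spec_cpu_set_to_list s (cpu_set_to_list s)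

-- ===== LEMMAS AND PROOFS =====

-- the mask as a value: Σ hexVal c_j · 16^j over the reversed string
def maskOf : List Char → Nat
  | [] => 0
  | c :: r => hexVal c + 16 * maskOf r

-- the ascending list of set-bit positions of m
def bits (m : Nat) : List Nat := (List.range (Nat.size m)).filter (fun i => m.testBit i)

theorem hexVal_lt (c : Char) : hexVal c < 16 := by
  unfold hexVal; dsimp only; split_ifs <;> omega

theorem maskLoopB_eq : ∀ (l : List Char) (mask shift : Nat),
    maskLoopB l mask shift = mask + maskOf l * 2 ^ shift := by
  intro l
  induction l with
  | nil => intro mask shift; simp [maskLoopB, maskOf]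
  | cons c r ih =>
    intro mask shift
    simp only [maskLoopB, maskOf, ih, Nat.shiftLeft_eq, pow_add]
    ring

theorem mem_bits {m j : Nat} : j ∈ bits m ↔ m.testBit j = true := by
  simp only [bits, List.mem_filter, List.mem_range]
  constructor
  · rintro ⟨-, h⟩; exact h
  · intro h
    exact ⟨Nat.lt_size.mpr (Nat.ge_two_pow_of_testBit h), h⟩

theorem bits_pairwise (m : Nat) : (bits m).Pairwise (· < ·) :=
  (List.pairwise_lt_range).filter _

theorem bits_zero : bits 0 = [] := by simp [bits, Nat.size_zero]

theorem bits_decomp (n M : Nat) (hn : n < 16) :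
    bits (n + 16 * M) = (List.range 4).filter (fun j => n.testBit j) ++ (bits M).map (· + 4) := by
  have htb : ∀ j, (n + 16 * M).testBit j = if j < 4 then n.testBit j else M.testBit (j - 4) := by
    intro j
    have : n + 16 * M = 2 ^ 4 * M + n := by ring
    rw [this, Nat.testBit_two_pow_mul_add M (show n < 2 ^ 4 by norm_num; omega) j]
  have hmemL : ∀ j, j ∈ (List.range 4).filter (fun j => n.testBit j) ↔ j < 4 ∧ n.testBit j = true := by
    intro j; simp [List.mem_filter, List.mem_range]
  have hmemR : ∀ j, j ∈ (bits M).map (· + 4) ↔ 4 ≤ j ∧ M.testBit (j - 4) = true := by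
    intro j
    simp only [List.mem_map, mem_bits]
    constructor
    · rintro ⟨j', hj', rfl⟩; exact ⟨by omega, by simpa using hj'⟩
    · rintro ⟨h4, ht⟩; exact ⟨j - 4, ht, by omega⟩
  have hperm : (bits (n + 16 * M)).Perm
      ((List.range 4).filter (fun j => n.testBit j) ++ (bits M).map (· + 4)) := by
    rw [List.perm_ext_iff_of_nodup]
    · intro j
      rw [mem_bits, htb j, List.mem_append, hmemL, hmemR]
      by_cases h4 : j < 4 <;> simp [h4] <;> omega
    · exact (bits_pairwise _).nodup
    · rw [List.nodup_append]
      refine ⟨(List.nodup_range).filter _, (bits_pairwise M).nodup.map (fun a b h => by omega), ?_⟩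
      intro j hj j' hj'
      rw [hmemL] at hj; rw [hmemR] at hj'
      omega
  refine List.eq_of_perm_of_sorted (fun a b _ _ h1 h2 => by omega) (bits_pairwise _) ?_ hperm
  rw [List.pairwise_append]
  refine ⟨List.pairwise_lt_range.filter _, ?_, ?_⟩
  · exact ((bits_pairwise M).map _ (by intro a b h; omega))
  · intro a ha b hb
    rw [hmemL] at ha; rw [hmemR] at hb
    omega

theorem cpuLoopA_eq : ∀ (l : List Char) (cpus : List String) (k : Nat),
    cpuLoopA l cpus ((4 * k : Nat) : Int)
      = cpus ++ (bits (maskOf l)).map (fun j : Nat => PySem.Int.toStr ((4 * k + j : Nat) : Int)) := by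
  intro l
  induction l with
  | nil => intro cpus k; simp [cpuLoopA, maskOf, bits_zero]
  | cons c r ih =>
    intro cpus k
    have hn : hexVal c < 16 := hexVal_lt c
    show cpuLoopA (c :: r) cpus ((4 * k : Nat) : Int)
      = cpus ++ (bits (hexVal c + 16 * maskOf r)).map (fun j : Nat => PySem.Int.toStr ((4 * k + j : Nat) : Int))
    rw [bits_decomp _ _ hn, List.map_append, ← List.append_assoc, List.map_map]
    rw [show ((fun j : Nat => PySem.Int.toStr ((4 * k + j : Nat) : Int)) ∘ (· + 4))
          = (fun j : Nat => PySem.Int.toStr ((4 * (k + 1) + j : Nat) : Int)) from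
        funext fun j => by simp only [Function.comp]; congr 1; push_cast; ring]
    rw [← ih (cpus ++ ((List.range 4).filter (fun j => (hexVal c).testBit j)).map
          (fun j : Nat => PySem.Int.toStr ((4 * k + j : Nat) : Int))) (k + 1)]
    generalize hgen : hexVal c = n at hn ⊢
    simp only [cpuLoopA, hgen]
    interval_cases n <;>
      simp [List.range_succ, Nat.testBit_eq_decide_div_mod_eq] <;> ring_nf

theorem portA_eq (s : String) :
    cpu_set_to_list s
      = (bits (maskOf s.toList.reverse)).map (fun j : Nat => PySem.Int.toStr ((j : Nat) : Int)) := by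
  have h := cpuLoopA_eq s.toList.reverse [] 0
  simp only [Nat.mul_zero, Nat.cast_zero, Nat.zero_add, List.nil_append] at h
  exact h

theorem portB_eq (s : String) :
    cpu_set_to_list_alt s
      = (bits (maskOf s.toList.reverse)).map (fun j : Nat => PySem.Int.toStr ((j : Nat) : Int)) := by
  unfold cpu_set_to_list_alt
  rw [maskLoopB_eq]
  simp only [pow_zero, mul_one, Nat.zero_add]
  rw [PySem.List.foldl_append_if, List.nil_append]
  congr 1
  unfold bits
  apply List.filter_congr
  intro i _
  simp only [Nat.testBit_eq_decide_div_mod_eq, Nat.shiftRight_eq_div_pow, Nat.and_one_is_mod]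
  by_cases h : maskOf s.toList.reverse / 2 ^ i % 2 = 1 <;> simp [h]

-- ===== VERDICT (by name: the statement is the Claim_ definition above) =====
theorem cpu_set_to_list_spec : Claim_equal_cpu_set_to_list := by
  intro s _ _
  unfold Spec_cpu_set_to_list
  rw [portA_eq, portB_eq]
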